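-- pv_equiv track=rewrite | github.com/Prashant161999/AI- | views.py | filter_skill
-- ===== SOURCE A (Python) =====
-- db_skills = ['management', 'leadership', 'product development', 'testing', 'agile', 'communication', 'creative', 'problem solving', 'design', 'software development', 'writing']
--
-- def filter_skill(in_skills):
--     found_skill = ""
--     for skill in db_skills:
--         for in_skill in in_skills:
--             if str(skill) == str(in_skill):
--                 found_skill = in_skill.lower()
--                 return found_skill
--             else:
--                 found_skill = ""
--     return found_skill
-- ===== SOURCE B (Python) =====
-- db_skills = ['management', 'leadership', 'product development', 'testing', 'agile', 'communication', 'creative', 'problem solving', 'design', 'software development', 'writing']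
--
-- _prio = {s: i for i, s in enumerate(db_skills)}
--
-- def filter_skill(in_skills):
--     best = None  # (skill from in_skills, its db priority)
--     for in_skill in in_skills:
--         p = _prio.get(str(in_skill))
--         if p is not None and (best is None or p < best[1]):
--             best = (in_skill, p)
--     return best[0].lower() if best is not None else ""
-- ===== Notes on version B (the rewrite author's own statement) =====
-- stated objective: faster
-- what changed: Replaced the nested db-by-input scan with a precomputed skill-to-index dict and a single pass over in_skills keeping the candidate of smallest db priority (strict-less so the first input-order occurrence wins).
import Mathlib
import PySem

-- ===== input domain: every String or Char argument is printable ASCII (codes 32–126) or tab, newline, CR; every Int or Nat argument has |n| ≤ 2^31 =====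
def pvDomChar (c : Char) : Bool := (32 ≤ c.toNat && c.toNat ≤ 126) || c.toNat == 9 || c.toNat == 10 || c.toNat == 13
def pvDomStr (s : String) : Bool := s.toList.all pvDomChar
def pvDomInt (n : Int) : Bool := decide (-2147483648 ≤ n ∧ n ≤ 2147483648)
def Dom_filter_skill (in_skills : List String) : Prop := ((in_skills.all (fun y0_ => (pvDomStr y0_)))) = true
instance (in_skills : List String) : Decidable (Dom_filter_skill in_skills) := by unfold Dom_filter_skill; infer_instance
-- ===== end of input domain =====

-- B replaces A's nested db×input scan by a precomputed skill→index dict and one pass over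
-- in_skills keeping the candidate with the smallest db priority (objective: faster, constant factor).

-- ===== PORT A =====
def dbSkills : List String := ["management", "leadership", "product development", "testing", "agile", "communication", "creative", "problem solving", "design", "software development", "writing"]

-- inner 'for in_skill in in_skills': early return of in_skill.lower() on a hit; the else
-- branch's 'found_skill = ""' only restores the initial value, so fall-through is none.
def aInner (skill : String) (ins : List String) : Option String :=
  match ins with
  | [] => none
  | x :: xs => if skill == x then some (PySem.Str.lower x) else aInner skill xs

-- outer 'for skill in db_skills': the early return propagates, otherwise found_skill is ""
def aOuter (db : List String) (ins : List String) : String :=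
  match db with
  | [] => ""
  | s :: rest =>
    match aInner s ins with
    | some v => v
    | none => aOuter rest ins

def filter_skill (in_skills : List String) : String := aOuter dbSkills in_skills

-- ===== PORT B =====
-- _prio = {s: i for i, s in enumerate(db_skills)}
def prioDict : PySem.Dict String Int :=
  (PySem.List.enumerate dbSkills 0).foldl (fun d p => d.insert p.2 p.1) PySem.Dict.empty

-- one iteration of B's loop over in_skills
def bStep (best : Option (String × Int)) (sk : String) : Option (String × Int) :=
  match prioDict.get? sk with
  | none => best
  | some p =>
    match best with
    | none => some (sk, p)
    | some b => if p < b.2 then some (sk, p) else best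

def filter_skill_alt (in_skills : List String) : String :=
  match in_skills.foldl bStep none with
  | some b => PySem.Str.lower b.1
  | none => ""

-- ===== PRECONDITION & SPEC =====
def Spec_filter_skill (in_skills : List String) (out : String) : Prop := out = filter_skill_alt in_skills
instance (in_skills : List String) (out : String) : Decidable (Spec_filter_skill in_skills out) := by unfold Spec_filter_skill; infer_instance

-- ===== CLAIM (what is proved, stated in full; the proofs are below) =====
def Claim_equal_filter_skill : Prop := ∀ (in_skills : List String), Dom_filter_skill in_skills → Spec_filter_skill in_skills (filter_skill in_skills)

-- ===== LEMMAS AND PROOFS =====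

-- generic form of B's loop body, parametrised by the key-lookup function
def gStep (k : String → Option Int) (acc : Option (String × Int)) (sk : String) : Option (String × Int) :=
  match k sk with
  | none => acc
  | some p =>
    match acc with
    | none => some (sk, p)
    | some b => if p < b.2 then some (sk, p) else acc

-- index of sk in db, offset by n (what the priority dict computes)
def keyAux (n : Int) (db : List String) (sk : String) : Option Int :=
  match db with
  | [] => none
  | s :: r => if s == sk then some n else keyAux (n + 1) r sk

theorem keyAux_not_mem (db : List String) (n : Int) (sk : String) (h : sk ∉ db) :
    keyAux n db sk = none := by
  induction db generalizing n with
  | nil => rfl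
  | cons s r ih =>
    have hs : ¬ (s == sk) = true := by simp; rintro rfl; exact h List.mem_cons_self
    simp only [keyAux, if_neg hs]
    exact ih (n + 1) (fun hm => h (List.mem_cons_of_mem _ hm))

theorem get_foldl_enum (db : List String) (n : Int) (d : PySem.Dict String Int) (sk : String)
    (hnd : db.Nodup) :
    ((PySem.List.enumerate db n).foldl (fun d p => d.insert p.2 p.1) d).get? sk =
      (if sk ∈ db then keyAux n db sk else d.get? sk) := by
  induction db generalizing n d with
  | nil => simp [PySem.List.enumerate_nil]
  | cons s r ih =>
    rw [PySem.List.enumerate_cons, List.foldl_cons]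
    rw [ih (n + 1) _ hnd.of_cons]
    by_cases hr : sk ∈ r
    · have hne : sk ≠ s := fun he => (List.nodup_cons.mp hnd).1 (he ▸ hr)
      have hbe : ¬ (s == sk) = true := by simp; exact fun he => hne he.symm
      simp [hr, List.mem_cons, keyAux, hbe]
    · by_cases hs : sk = s
      · subst hs
        simp [hr, keyAux, PySem.Dict.get?_insert_self]
      · have hbe : ¬ (s == sk) = true := by simp; exact fun he => hs he.symm
        simp [hr, hs, PySem.Dict.get?_insert_of_ne d n hs]

theorem dbSkills_nodup : dbSkills.Nodup := by decide

theorem prioDict_get (sk : String) : prioDict.get? sk = keyAux 0 dbSkills sk := by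
  rw [prioDict, get_foldl_enum dbSkills 0 PySem.Dict.empty sk dbSkills_nodup]
  by_cases hm : sk ∈ dbSkills
  · simp [hm]
  · simp [hm, keyAux_not_mem dbSkills 0 sk hm, PySem.Dict.empty, PySem.Dict.get?]

theorem bStep_eq : bStep = gStep (keyAux 0 dbSkills) := by
  funext acc sk
  simp [bStep, gStep, prioDict_get]

theorem keyAux_ge (db : List String) (n q : Int) (sk : String) (h : keyAux n db sk = some q) : n ≤ q := by
  induction db generalizing n with
  | nil => simp [keyAux] at h
  | cons s r ih =>
    simp only [keyAux] at h
    split at h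
    · injection h with h'; omega
    · have := ih (n + 1) h; omega

theorem gfold_keep (k : String → Option Int) (n : Int) (x : String)
    (hmin : ∀ y q, k y = some q → n ≤ q) (ins : List String) :
    ins.foldl (gStep k) (some (x, n)) = some (x, n) := by
  induction ins with
  | nil => rfl
  | cons sk tl ih =>
    have hstep : gStep k (some (x, n)) sk = some (x, n) := by
      simp only [gStep]
      cases hk : k sk with
      | none => rfl
      | some p =>
        have := hmin sk p hk
        simp [show ¬ p < n by omega]
    simpa [List.foldl, hstep] using ih

theorem gfold_min (k : String → Option Int) (n : Int) (s : String)
    (hks : k s = some n) (hmin : ∀ y q, k y = some q → n ≤ q) :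
    ∀ (ins : List String) (acc : Option (String × Int)),
      (acc = none ∨ ∃ b, acc = some b ∧ n < b.2) → s ∈ ins →
      ∃ y, ins.foldl (gStep k) acc = some (y, n) ∧ k y = some n := by
  intro ins
  induction ins with
  | nil => intro acc _ hmem; simp at hmem
  | cons sk tl ih =>
    intro acc hacc hmem
    cases hk : k sk with
    | none =>
      have hne : sk ≠ s := fun he => by rw [he, hks] at hk; cases hk
      have hmem' : s ∈ tl := (List.mem_cons.mp hmem).resolve_left (fun h => hne h.symm)
      have hstep : gStep k acc sk = acc := by simp [gStep, hk]
      simpa [List.foldl, hstep] using ih acc hacc hmem'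
    | some p =>
      rcases eq_or_lt_of_le (hmin sk p hk) with heq | hlt
      · -- p = n: sk becomes the stored best and stays
        subst heq
        have hstep : gStep k acc sk = some (sk, n) := by
          rcases hacc with h | ⟨b, hb, hbn⟩
          · simp [gStep, hk, h]
          · simp [gStep, hk, hb, hbn]
        rw [List.foldl_cons, hstep]
        exact ⟨sk, gfold_keep k n sk hmin tl, hk⟩
      · -- n < p: the new acc still has priority > n, and s must be in the tail
        have hne : sk ≠ s := fun he => by rw [he, hks] at hk; injection hk with h; omega
        have hmem' : s ∈ tl := (List.mem_cons.mp hmem).resolve_left (fun h => hne h.symm)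
        have hacc' : gStep k acc sk = none ∨ ∃ b, gStep k acc sk = some b ∧ n < b.2 := by
          rcases hacc with h | ⟨b, hb, hbn⟩
          · right; exact ⟨(sk, p), by simp [gStep, hk, h], hlt⟩
          · right
            by_cases hpb : p < b.2
            · exact ⟨(sk, p), by simp [gStep, hk, hb, hpb], hlt⟩
            · exact ⟨b, by simp [gStep, hk, hb, hpb], hbn⟩
        simpa [List.foldl] using ih (gStep k acc sk) hacc' hmem'

theorem gfold_congr (k1 k2 : String → Option Int) :
    ∀ (ins : List String) (acc : Option (String × Int)), (∀ y ∈ ins, k1 y = k2 y) →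
      ins.foldl (gStep k1) acc = ins.foldl (gStep k2) acc := by
  intro ins
  induction ins with
  | nil => intro acc _; rfl
  | cons sk tl ih =>
    intro acc h
    have hsk : k1 sk = k2 sk := h sk (List.mem_cons_self)
    have hstep : gStep k1 acc sk = gStep k2 acc sk := by simp [gStep, hsk]
    simpa [List.foldl, hstep] using ih (gStep k2 acc sk) (fun y hy => h y (List.mem_cons_of_mem _ hy))

theorem gfold_none (ins : List String) (acc : Option (String × Int)) :
    ins.foldl (gStep (fun _ => none)) acc = acc := by
  induction ins generalizing acc with
  | nil => rfl
  | cons sk tl ih => simpa [List.foldl, gStep] using ih acc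

theorem aInner_mem (s : String) (ins : List String) (h : s ∈ ins) :
    aInner s ins = some (PySem.Str.lower s) := by
  induction ins with
  | nil => simp at h
  | cons x xs ih =>
    simp only [aInner]
    by_cases hx : s == x
    · have : s = x := eq_of_beq hx
      simp [← this]
    · have : s ∈ xs := by
        rcases List.mem_cons.mp h with h' | h'
        · exact absurd (by simp [h']) hx
        · exact h'
      simp [hx, ih this]

theorem aInner_not_mem (s : String) (ins : List String) (h : s ∉ ins) :
    aInner s ins = none := by
  induction ins with
  | nil => rfl
  | cons x xs ih =>
    have hx : ¬ (s == x) = true := by simp; rintro rfl; exact h List.mem_cons_self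
    simp only [aInner, if_neg hx]
    exact ih (fun hm => h (List.mem_cons_of_mem _ hm))

theorem main_equiv (db : List String) (n : Int) (ins : List String) :
    aOuter db ins =
      (match ins.foldl (gStep (keyAux n db)) none with
       | some b => PySem.Str.lower b.1
       | none => "") := by
  induction db generalizing n with
  | nil =>
    have hk : keyAux n ([] : List String) = fun _ => none := by funext y; rfl
    simp [aOuter, hk, gfold_none]
  | cons s rest ih =>
    by_cases hm : s ∈ ins
    · have hks : keyAux n (s :: rest) s = some n := by simp [keyAux]
      have hmin : ∀ y q, keyAux n (s :: rest) y = some q → n ≤ q := by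
        intro y q h
        simp only [keyAux] at h
        split at h
        · injection h with h'; omega
        · have := keyAux_ge rest (n + 1) q y h; omega
      have huniq : ∀ y, keyAux n (s :: rest) y = some n → y = s := by
        intro y h
        simp only [keyAux] at h
        split at h
        · exact (eq_of_beq (by assumption)).symm
        · have := keyAux_ge rest (n + 1) n y h; omega
      obtain ⟨y, hfold, hky⟩ := gfold_min _ n s hks hmin ins none (Or.inl rfl) hm
      rw [show aOuter (s :: rest) ins = PySem.Str.lower s by simp [aOuter, aInner_mem s ins hm]]
      rw [hfold, huniq y hky]
    · have hagree : ∀ y ∈ ins, keyAux n (s :: rest) y = keyAux (n + 1) rest y := by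
        intro y hy
        have : ¬ (s == y) = true := by simp; rintro rfl; exact hm hy
        simp [keyAux, this]
      rw [show aOuter (s :: rest) ins = aOuter rest ins by simp [aOuter, aInner_not_mem s ins hm]]
      rw [gfold_congr _ _ ins none hagree]
      exact ih (n + 1)

-- ===== VERDICT (by name: the statement is the Claim_ definition above) =====
theorem filter_skill_spec : Claim_equal_filter_skill := by
  intro in_skills _
  unfold Spec_filter_skill filter_skill filter_skill_alt
  rw [bStep_eq]
  exact main_equiv dbSkills 0 in_skills
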